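-- pv_equiv track=rewrite | github.com/appmlk/ConDefects | Code/abc323_f/Python/50030718/correctVersion.py | floor_sum
-- ===== SOURCE A (Python) =====
-- def floor_sum(n, m, a, b):
--     ret = 0
--     while n > 0 and m > 0:
--         ret += (a // m) * n * (n-1) // 2 + (b // m) * n
--         a, b = a % m, b % m
--         last = a * n + b
--         n, m, a, b = last // m, a, m, last % m
--     return ret
-- ===== SOURCE B (Python) =====
-- def floor_sum(n, m, a, b):
--     # Recursive Euclidean descent split into three separate reduction rules
--     # (normalise a, normalise b, then the swap step), instead of A's fused loop body.
--     if n <= 0 or m <= 0: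
--         return 0
--     if a < 0 or a >= m:
--         return (a // m) * n * (n - 1) // 2 + floor_sum(n, m, a % m, b)
--     if b < 0 or b >= m:
--         return (b // m) * n + floor_sum(n, m, a, b % m)
--     last = a * n + b
--     return floor_sum(last // m, a, m, last % m)
-- ===== Notes on version B (the rewrite author's own statement) =====
-- stated objective: alternative
-- what changed: Replaces A's imperative while-loop with a fused update body by a recursion split into three separate self-contained reduction rules (normalise a, normalise b, Euclidean swap step), each applied only when needed.
import Mathlib
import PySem

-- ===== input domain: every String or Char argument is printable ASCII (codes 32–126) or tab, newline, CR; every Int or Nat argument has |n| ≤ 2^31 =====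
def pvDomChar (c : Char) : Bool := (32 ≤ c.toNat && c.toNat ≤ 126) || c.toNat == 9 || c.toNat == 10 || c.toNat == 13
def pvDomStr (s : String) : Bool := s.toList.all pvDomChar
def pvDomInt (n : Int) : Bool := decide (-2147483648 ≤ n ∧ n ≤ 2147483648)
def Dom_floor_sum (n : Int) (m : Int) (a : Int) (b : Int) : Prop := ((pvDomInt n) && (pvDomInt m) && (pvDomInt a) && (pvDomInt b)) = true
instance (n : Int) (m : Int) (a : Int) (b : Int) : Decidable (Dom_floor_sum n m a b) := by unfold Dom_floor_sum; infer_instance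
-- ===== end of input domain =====

-- B rewrites A's single fused while-loop as a recursion of three separate reduction rules
-- (normalise a, normalise b, Euclidean swap); same values everywhere (objective: alternative).

-- ===== PORT A =====
-- Literal port of A's while loop: state (n, m, a, b, ret), one recursive call per iteration.
def floorSumLoopA (n : Int) (m : Int) (a : Int) (b : Int) (ret : Int) : Int :=
  if h : 0 < n ∧ 0 < m then
    let ret' := ret + (PySem.Int.floordiv (PySem.Int.floordiv a m * n * (n - 1)) 2
                        + PySem.Int.floordiv b m * n)
    let a' := PySem.Int.mod a m
    let b' := PySem.Int.mod b m
    let last := a' * n + b'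
    floorSumLoopA (PySem.Int.floordiv last m) a' m (PySem.Int.mod last m) ret'
  else ret
termination_by m.toNat
decreasing_by
  have hm : 0 < m := h.2
  have h1 : PySem.Int.mod a m = a % m := PySem.Int.mod_eq_emod_of_pos hm
  have hb1 : 0 ≤ a % m := Int.emod_nonneg _ (by omega)
  have hb2 : a % m < m := Int.emod_lt_of_pos _ hm
  omega

def floor_sum (n : Int) (m : Int) (a : Int) (b : Int) : Int :=
  floorSumLoopA n m a b 0

-- ===== PORT B =====
-- Port of Source B: three reduction rules as separate recursion branches.
def floor_sum_alt (n : Int) (m : Int) (a : Int) (b : Int) : Int :=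
  if h0 : n ≤ 0 ∨ m ≤ 0 then 0
  else if h1 : a < 0 ∨ m ≤ a then
    PySem.Int.floordiv (PySem.Int.floordiv a m * n * (n - 1)) 2
      + floor_sum_alt n m (PySem.Int.mod a m) b
  else if h2 : b < 0 ∨ m ≤ b then
    PySem.Int.floordiv b m * n + floor_sum_alt n m a (PySem.Int.mod b m)
  else
    floor_sum_alt (PySem.Int.floordiv (a * n + b) m) a m (PySem.Int.mod (a * n + b) m)
termination_by ((m.toNat, (if 0 ≤ a ∧ a < m then 0 else 1), (if 0 ≤ b ∧ b < m then 0 else 1)) : Nat ×ₗ Nat ×ₗ Nat)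
decreasing_by
  · -- rule 1: a is normalised into [0, m)
    have hm : 0 < m := by omega
    have he : PySem.Int.mod a m = a % m := PySem.Int.mod_eq_emod_of_pos hm
    have hb1 : 0 ≤ a % m := Int.emod_nonneg _ (by omega)
    have hb2 : a % m < m := Int.emod_lt_of_pos _ hm
    apply Prod.Lex.right
    apply Prod.Lex.left
    rw [he, if_pos (And.intro hb1 hb2), if_neg (show ¬ (0 ≤ a ∧ a < m) by omega)]
    omega
  · -- rule 2: b is normalised into [0, m)
    have hm : 0 < m := by omega
    have he : PySem.Int.mod b m = b % m := PySem.Int.mod_eq_emod_of_pos hm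
    have hb1 : 0 ≤ b % m := Int.emod_nonneg _ (by omega)
    have hb2 : b % m < m := Int.emod_lt_of_pos _ hm
    apply Prod.Lex.right
    apply Prod.Lex.right
    rw [he, if_pos (And.intro hb1 hb2), if_neg (show ¬ (0 ≤ b ∧ b < m) by omega)]
    omega
  · -- rule 3: the new modulus is a with 0 ≤ a < m
    apply Prod.Lex.left
    omega

-- ===== PRECONDITION & SPEC =====
def Spec_floor_sum (n : Int) (m : Int) (a : Int) (b : Int) (out : Int) : Prop := out = floor_sum_alt n m a b
instance (n : Int) (m : Int) (a : Int) (b : Int) (out : Int) : Decidable (Spec_floor_sum n m a b out) := by unfold Spec_floor_sum; infer_instance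

-- ===== CLAIM (what is proved, stated in full; the proofs are below) =====
def Claim_equal_floor_sum : Prop := ∀ (n : Int) (m : Int) (a : Int) (b : Int), Dom_floor_sum n m a b → Spec_floor_sum n m a b (floor_sum n m a b)

-- ===== LEMMAS AND PROOFS =====

theorem pv_fd_zero {a m : Int} (h0 : 0 ≤ a) (h1 : a < m) : PySem.Int.floordiv a m = 0 := by
  rw [PySem.Int.floordiv_eq_ediv_of_pos (by omega)]
  exact Int.ediv_eq_zero_of_lt h0 h1

theorem pv_md_self {a m : Int} (h0 : 0 ≤ a) (h1 : a < m) : PySem.Int.mod a m = a := by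
  rw [PySem.Int.mod_eq_emod_of_pos (by omega)]
  exact Int.emod_eq_of_lt h0 h1

theorem pv_md_bounds (a : Int) {m : Int} (hm : 0 < m) :
    0 ≤ PySem.Int.mod a m ∧ PySem.Int.mod a m < m := by
  rw [PySem.Int.mod_eq_emod_of_pos hm]
  exact ⟨Int.emod_nonneg _ (by omega), Int.emod_lt_of_pos _ hm⟩

-- Reduction rule 1 of B holds for all a (trivially when a is already in range).
theorem alt_ruleA (n m a b : Int) (hn : 0 < n) (hm : 0 < m) :
    floor_sum_alt n m a b =
      PySem.Int.floordiv (PySem.Int.floordiv a m * n * (n - 1)) 2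
        + floor_sum_alt n m (PySem.Int.mod a m) b := by
  by_cases h : a < 0 ∨ m ≤ a
  · conv_lhs => rw [floor_sum_alt]
    rw [dif_neg (by omega), dif_pos h]
  · rw [pv_fd_zero (show (0:Int) ≤ a by omega) (show a < m by omega),
        pv_md_self (show (0:Int) ≤ a by omega) (show a < m by omega),
        show (0:Int) * n * (n - 1) = 0 by ring,
        pv_fd_zero (le_refl (0:Int)) (show (0:Int) < 2 by norm_num)]
    ring

-- Reduction rule 2 of B holds for all b once a is in range.
theorem alt_ruleB (n m a b : Int) (hn : 0 < n) (hm : 0 < m) (ha0 : 0 ≤ a) (ha1 : a < m) :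
    floor_sum_alt n m a b =
      PySem.Int.floordiv b m * n + floor_sum_alt n m a (PySem.Int.mod b m) := by
  by_cases h : b < 0 ∨ m ≤ b
  · conv_lhs => rw [floor_sum_alt]
    rw [dif_neg (by omega), dif_neg (by omega), dif_pos h]
  · rw [pv_fd_zero (show (0:Int) ≤ b by omega) (show b < m by omega),
        pv_md_self (show (0:Int) ≤ b by omega) (show b < m by omega)]
    ring

-- Reduction rule 3 (the Euclidean swap) once both a and b are in range.
theorem alt_ruleC (n m a b : Int) (hn : 0 < n) (hm : 0 < m) (ha0 : 0 ≤ a) (ha1 : a < m)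
    (hb0 : 0 ≤ b) (hb1 : b < m) :
    floor_sum_alt n m a b =
      floor_sum_alt (PySem.Int.floordiv (a * n + b) m) a m (PySem.Int.mod (a * n + b) m) := by
  conv_lhs => rw [floor_sum_alt]
  rw [dif_neg (by omega), dif_neg (by omega), dif_neg (by omega)]

-- A's loop computes ret plus B's value, by strong induction on m.
theorem loopA_eq (k : Nat) : ∀ (n m a b ret : Int), m.toNat ≤ k →
    floorSumLoopA n m a b ret = ret + floor_sum_alt n m a b := by
  induction k with
  | zero =>
    intro n m a b ret hk
    rw [floorSumLoopA, floor_sum_alt]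
    rw [dif_neg (show ¬ (0 < n ∧ 0 < m) by omega), dif_pos (show n ≤ 0 ∨ m ≤ 0 by omega)]
    ring
  | succ k ih =>
    intro n m a b ret hk
    by_cases h : 0 < n ∧ 0 < m
    · obtain ⟨hn, hm⟩ := h
      obtain ⟨ha0, ha1⟩ := pv_md_bounds a hm
      obtain ⟨hb0, hb1⟩ := pv_md_bounds b hm
      rw [floorSumLoopA, dif_pos (And.intro hn hm)]
      rw [ih _ _ _ _ _ (by omega)]
      rw [alt_ruleA n m a b hn hm, alt_ruleB n m (PySem.Int.mod a m) b hn hm ha0 ha1,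
          alt_ruleC n m (PySem.Int.mod a m) (PySem.Int.mod b m) hn hm ha0 ha1 hb0 hb1]
      ring
    · rw [floorSumLoopA, floor_sum_alt]
      rw [dif_neg h, dif_pos (show n ≤ 0 ∨ m ≤ 0 by omega)]
      ring

-- ===== VERDICT (by name: the statement is the Claim_ definition above) =====
theorem floor_sum_spec : Claim_equal_floor_sum := by
  intro n m a b _
  unfold Spec_floor_sum floor_sum
  rw [loopA_eq m.toNat n m a b 0 (le_refl _)]
  ring
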